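-- pv_equiv track=rewrite | github.com/felixquinton/dcop_mrp | src/patrol_essential/patrol_essential/dcop/mrp_mdvrp_to_yaml.py | create_domains
-- ===== SOURCE A (Python) =====
-- def create_domains(w_ids, r_ids, w_req, r_sen, visit_csts_type="implicit"):
--     """Defines the variables domains.
--     :param w_ids: list of int, waypoint ids
--     :param r_ids: list of int, robot ids
--     :param w_req: dic, keys are waypoint ids, values are sensor requirements
--     :param r_sen: dic, keys are robots ids, values are avalable sensors
--     :visit_csts_type: str from {"intentional", "extensional", "implicit"}, the
--     type of constraints expressing that waypoints must be visited exactly once.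
--     """
--     if visit_csts_type == "implicit":
--         res = {f'd_{w}': {"values": [r_ind for r_ind, r in enumerate(r_ids)
--                                      if set(w_req[w]) & set(r_sen[r])]
--                           }
--                for w in w_ids}
--     else:
--         # TODO: Sensor match for non implicit models
--         res = {"d1": {"values": [0, 1]}}
--     return res
-- ===== SOURCE B (Python) =====
-- def create_domains(w_ids, r_ids, w_req, r_sen, visit_csts_type="implicit"):
--     """Inverted sensor->robot-indices index built in one pass over the robots;
--     each waypoint's domain is the sorted union over its required sensors.
--     Missing dict keys are treated as 'no sensors' (A raises KeyError there)."""
--     if visit_csts_type != "implicit":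
--         # TODO: Sensor match for non implicit models
--         return {"d1": {"values": [0, 1]}}
--     inv = {}
--     for r_ind, r in enumerate(r_ids):
--         for s in r_sen.get(r, []):
--             inv.setdefault(s, set()).add(r_ind)
--     res = {}
--     for w in w_ids:
--         matched = set()
--         for s in w_req.get(w, []):
--             matched |= inv.get(s, set())
--         res[f'd_{w}'] = {"values": sorted(matched)}
--     return res
-- ===== Notes on version B (the rewrite author's own statement) =====
-- stated objective: alternative
-- what changed: B builds an inverted sensor->robot-indices index in one pass over the robots and answers each waypoint by a union over its required sensors (sorted), instead of A's building and intersecting the requirement and sensor sets for every (waypoint, robot) pair.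
import Mathlib
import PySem

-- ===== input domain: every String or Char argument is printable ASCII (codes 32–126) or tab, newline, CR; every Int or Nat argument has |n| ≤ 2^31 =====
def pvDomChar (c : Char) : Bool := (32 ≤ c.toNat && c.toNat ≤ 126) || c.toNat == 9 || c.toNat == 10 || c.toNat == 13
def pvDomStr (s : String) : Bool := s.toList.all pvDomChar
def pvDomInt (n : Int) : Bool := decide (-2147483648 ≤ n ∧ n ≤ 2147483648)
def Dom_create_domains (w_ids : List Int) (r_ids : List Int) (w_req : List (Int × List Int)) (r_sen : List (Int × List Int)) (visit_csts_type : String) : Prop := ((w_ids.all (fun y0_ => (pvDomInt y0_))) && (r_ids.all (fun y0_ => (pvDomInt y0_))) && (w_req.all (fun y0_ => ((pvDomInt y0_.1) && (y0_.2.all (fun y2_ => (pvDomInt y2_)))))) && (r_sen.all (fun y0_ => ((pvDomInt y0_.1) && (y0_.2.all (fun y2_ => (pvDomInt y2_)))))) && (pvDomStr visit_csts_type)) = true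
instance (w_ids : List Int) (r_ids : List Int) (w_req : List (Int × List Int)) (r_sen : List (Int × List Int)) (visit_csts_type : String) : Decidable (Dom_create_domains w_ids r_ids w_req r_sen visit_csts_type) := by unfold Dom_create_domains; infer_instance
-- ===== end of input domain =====

-- B replaces A's per-(waypoint,robot) set intersections by an inverted sensor→robot-indices
-- index built in one pass over the robots; objective: alternative algorithm, same proven value.

-- dict lookup d[k] on an association list: first match (none = missing key)
def pyLookup (d : List (Int × List Int)) (k : Int) : Option (List Int) :=
  (d.find? (fun p => p.1 == k)).map (·.2)

-- ===== PORT A =====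
-- A's w_req[w] / r_sen[r] raise KeyError on a missing key; that case is excluded by
-- Pre_create_domains, so the port reads the lookup with a [] default there.
def create_domains (w_ids : List Int) (r_ids : List Int) (w_req : List (Int × List Int)) (r_sen : List (Int × List Int)) (visit_csts_type : String) : List (String × List (String × List Int)) :=
  if visit_csts_type == "implicit" then
    -- dict comprehension over w_ids; inner list comprehension over enumerate(r_ids)
    (w_ids.foldl (fun (res : PySem.Dict String (List (String × List Int))) w =>
        res.insert ("d_" ++ PySem.Int.toStr w)
          [("values",
            ((PySem.List.enumerate r_ids).filter (fun p =>
                !(PySem.Set.inter (PySem.Set.ofList ((pyLookup w_req w).getD []))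
                                  (PySem.Set.ofList ((pyLookup r_sen p.2).getD []))).isEmpty)).map (·.1))])
      PySem.Dict.empty).items
  else
    [("d1", [("values", [0, 1])])]

-- ===== PORT B =====
def create_domains_alt (w_ids : List Int) (r_ids : List Int) (w_req : List (Int × List Int)) (r_sen : List (Int × List Int)) (visit_csts_type : String) : List (String × List (String × List Int)) :=
  if !(visit_csts_type == "implicit") then
    [("d1", [("values", [0, 1])])]
  else
    -- inv: sensor -> set of robot indices (one pass over enumerate(r_ids), r_sen.get(r, []))
    let inv : PySem.Dict Int (PySem.Set Int) :=
      (PySem.List.enumerate r_ids).foldl (fun inv p =>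
        ((pyLookup r_sen p.2).getD []).foldl (fun inv s =>
          inv.insert s (PySem.Set.add (inv.getD s PySem.Set.empty) p.1)) inv)
        PySem.Dict.empty
    -- per waypoint: union of the index lists of its required sensors (w_req.get(w, [])), sorted
    (w_ids.foldl (fun (res : PySem.Dict String (List (String × List Int))) w =>
        res.insert ("d_" ++ PySem.Int.toStr w)
          [("values",
            PySem.List.sorted
              (((pyLookup w_req w).getD []).foldl
                (fun m s => PySem.Set.union m (inv.getD s PySem.Set.empty)) PySem.Set.empty)
              (fun x => x))])
      PySem.Dict.empty).items

-- ===== PRECONDITION & SPEC =====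
-- Pre_ excludes exactly the inputs where Python A raises KeyError: in the "implicit" branch
-- with both w_ids and r_ids non-empty, a waypoint missing from w_req or a robot missing from
-- r_sen (with w_ids = [] or r_ids = [] no lookup is evaluated and A returns normally).
def Pre_create_domains (w_ids : List Int) (r_ids : List Int) (w_req : List (Int × List Int)) (r_sen : List (Int × List Int)) (visit_csts_type : String) : Prop :=
  visit_csts_type = "implicit" → w_ids ≠ [] → r_ids ≠ [] →
    (∀ w ∈ w_ids, (pyLookup w_req w).isSome) ∧ (∀ r ∈ r_ids, (pyLookup r_sen r).isSome)
instance (w_ids : List Int) (r_ids : List Int) (w_req : List (Int × List Int)) (r_sen : List (Int × List Int)) (visit_csts_type : String) : Decidable (Pre_create_domains w_ids r_ids w_req r_sen visit_csts_type) := by unfold Pre_create_domains; infer_instance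

def pvWitness_create_domains : List Int × List Int × (List (Int × List Int)) × (List (Int × List Int)) × String :=
  ([1, 2], [5, 6], [(1, [0, 1]), (2, [2])], [(5, [1]), (6, [2, 3])], "implicit")

def Spec_create_domains (w_ids : List Int) (r_ids : List Int) (w_req : List (Int × List Int)) (r_sen : List (Int × List Int)) (visit_csts_type : String) (out : List (String × List (String × List Int))) : Prop := out = create_domains_alt w_ids r_ids w_req r_sen visit_csts_type
instance (w_ids : List Int) (r_ids : List Int) (w_req : List (Int × List Int)) (r_sen : List (Int × List Int)) (visit_csts_type : String) (out : List (String × List (String × List Int))) : Decidable (Spec_create_domains w_ids r_ids w_req r_sen visit_csts_type out) := by unfold Spec_create_domains; infer_instance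

-- ===== CLAIM (what is proved, stated in full; the proofs are below) =====
def Claim_equal_create_domains : Prop := ∀ (w_ids : List Int) (r_ids : List Int) (w_req : List (Int × List Int)) (r_sen : List (Int × List Int)) (visit_csts_type : String), Dom_create_domains w_ids r_ids w_req r_sen visit_csts_type → Pre_create_domains w_ids r_ids w_req r_sen visit_csts_type → Spec_create_domains w_ids r_ids w_req r_sen visit_csts_type (create_domains w_ids r_ids w_req r_sen visit_csts_type)

-- ===== LEMMAS AND PROOFS =====

-- membership in the inner fold of the index-building loop (one robot's sensors)
lemma getD_sensor_fold (ss : List Int) (i x s : Int) (d : PySem.Dict Int (PySem.Set Int)) :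
    x ∈ (ss.foldl (fun d s => d.insert s (PySem.Set.add (d.getD s PySem.Set.empty) i)) d).getD s PySem.Set.empty
      ↔ x ∈ d.getD s PySem.Set.empty ∨ (s ∈ ss ∧ x = i) := by
  induction ss generalizing d with
  | nil => simp
  | cons a ss ih =>
    simp only [List.foldl_cons, ih, PySem.Dict.getD_insert, List.mem_cons]
    by_cases h : s = a
    · subst h; simp [PySem.Set.mem_add]; tauto
    · simp [h]

-- membership in the inverted index built over a list of (index, robot) pairs
lemma getD_inv_fold (ps : List (Int × Int)) (sen : Int → List Int) (x s : Int)
    (d : PySem.Dict Int (PySem.Set Int)) :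
    x ∈ (ps.foldl (fun d p => (sen p.2).foldl
          (fun d s => d.insert s (PySem.Set.add (d.getD s PySem.Set.empty) p.1)) d) d).getD s PySem.Set.empty
      ↔ x ∈ d.getD s PySem.Set.empty ∨ ∃ p ∈ ps, s ∈ sen p.2 ∧ x = p.1 := by
  induction ps generalizing d with
  | nil => simp
  | cons q ps ih =>
    simp only [List.foldl_cons, ih, getD_sensor_fold, List.mem_cons]
    constructor
    · rintro (( h | ⟨hs, hx⟩) | ⟨p, hp, hs, hx⟩)
      · exact Or.inl h
      · exact Or.inr ⟨q, Or.inl rfl, hs, hx⟩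
      · exact Or.inr ⟨p, Or.inr hp, hs, hx⟩
    · rintro (h | ⟨p, (rfl | hp), hs, hx⟩)
      · exact Or.inl (Or.inl h)
      · exact Or.inl (Or.inr ⟨hs, hx⟩)
      · exact Or.inr ⟨p, hp, hs, hx⟩

-- the nodup of the union fold over required sensors
lemma nodup_union_fold (ss : List Int) (f : Int → PySem.Set Int) (m : PySem.Set Int) (hm : m.Nodup) :
    (ss.foldl (fun m s => PySem.Set.union m (f s)) m).Nodup := by
  induction ss generalizing m with
  | nil => exact hm
  | cons a ss ih => exact ih _ (PySem.Set.nodup_union m (f a) hm)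

-- membership in the union fold over required sensors
lemma mem_union_fold (ss : List Int) (f : Int → PySem.Set Int) (m : PySem.Set Int) (x : Int) :
    x ∈ ss.foldl (fun m s => PySem.Set.union m (f s)) m ↔ x ∈ m ∨ ∃ s ∈ ss, x ∈ f s := by
  induction ss generalizing m with
  | nil => simp
  | cons a ss ih =>
    simp only [List.foldl_cons, ih, PySem.Set.mem_union, List.mem_cons]
    constructor
    · rintro ((h | h) | ⟨s, hs, hx⟩)
      · exact Or.inl h
      · exact Or.inr ⟨a, Or.inl rfl, h⟩
      · exact Or.inr ⟨s, Or.inr hs, hx⟩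
    · rintro (h | ⟨s, (rfl | hs), hx⟩)
      · exact Or.inl (Or.inl h)
      · exact Or.inl (Or.inr hx)
      · exact Or.inr ⟨s, hs, hx⟩

-- A's filtered-enumerate index list, as used by port A, with its truthiness test unfolded
lemma mem_filter_enumerate (r_ids : List Int) (req : List Int) (sen : Int → List Int) (x : Int) :
    (x ∈ ((PySem.List.enumerate r_ids).filter (fun p =>
        !(PySem.Set.inter (PySem.Set.ofList req) (PySem.Set.ofList (sen p.2))).isEmpty)).map (·.1)
      ↔ ∃ p ∈ PySem.List.enumerate r_ids, x = p.1 ∧ ∃ s ∈ req, s ∈ sen p.2) := by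
  simp only [List.mem_map, List.mem_filter, Bool.not_eq_eq_eq_not, Bool.not_true,
    List.isEmpty_eq_false_iff_exists_mem, PySem.Set.mem_inter, PySem.Set.mem_ofList]
  aesop

-- core: per-waypoint value of B equals per-waypoint value of A (for any lookup results)
lemma per_waypoint_eq (r_ids : List Int) (req : List Int) (sen : Int → List Int) :
    PySem.List.sorted
      (req.foldl (fun m s => PySem.Set.union m
        (((PySem.List.enumerate r_ids).foldl (fun d p => (sen p.2).foldl
            (fun d s => d.insert s (PySem.Set.add (d.getD s PySem.Set.empty) p.1)) d)
            PySem.Dict.empty).getD s PySem.Set.empty)) PySem.Set.empty)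
      (fun x => x)
    = ((PySem.List.enumerate r_ids).filter (fun p =>
        !(PySem.Set.inter (PySem.Set.ofList req) (PySem.Set.ofList (sen p.2))).isEmpty)).map (·.1) := by
  have hpw : (((PySem.List.enumerate r_ids).filter (fun p =>
      !(PySem.Set.inter (PySem.Set.ofList req) (PySem.Set.ofList (sen p.2))).isEmpty)).map (·.1)).Pairwise (· < ·) :=
    List.Pairwise.map _ (fun a b h => h)
      ((PySem.List.pairwise_lt_enumerate r_ids 0).filter _)
  apply PySem.List.sorted_eq_of_perm_of_pairwise_lt
  · refine (List.perm_ext_iff_of_nodup (hpw.imp (fun h => ne_of_lt h))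
      (nodup_union_fold _ _ _ List.nodup_nil)).mpr ?_
    intro x
    rw [mem_filter_enumerate, mem_union_fold]
    simp only [getD_inv_fold, PySem.Dict.getD_empty]
    constructor
    · rintro ⟨p, hp, rfl, s, hs1, hs2⟩
      exact Or.inr ⟨s, hs1, Or.inr ⟨p, hp, hs2, rfl⟩⟩
    · rintro (h | ⟨s, hs, (h | ⟨p, hp, hsen, rfl⟩)⟩)
      · simp at h
      · simp at h
      · exact ⟨p, hp, rfl, s, hs, hsen⟩
  · exact hpw

theorem create_domains_eq_alt (w_ids : List Int) (r_ids : List Int)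
    (w_req : List (Int × List Int)) (r_sen : List (Int × List Int)) (t : String) :
    create_domains w_ids r_ids w_req r_sen t = create_domains_alt w_ids r_ids w_req r_sen t := by
  unfold create_domains create_domains_alt
  by_cases h : t == "implicit"
  · simp only [h, Bool.not_true, if_true]
    have hf : (fun (res : PySem.Dict String (List (String × List Int))) (w : Int) =>
        res.insert ("d_" ++ PySem.Int.toStr w)
          [("values",
            ((PySem.List.enumerate r_ids).filter (fun p =>
                !(PySem.Set.inter (PySem.Set.ofList ((pyLookup w_req w).getD []))
                                  (PySem.Set.ofList ((pyLookup r_sen p.2).getD []))).isEmpty)).map (·.1))])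
      = (fun (res : PySem.Dict String (List (String × List Int))) (w : Int) =>
        res.insert ("d_" ++ PySem.Int.toStr w)
          [("values",
            PySem.List.sorted
              (((pyLookup w_req w).getD []).foldl
                (fun m s => PySem.Set.union m
                  (((PySem.List.enumerate r_ids).foldl (fun d p => ((pyLookup r_sen p.2).getD []).foldl
                      (fun d s => d.insert s (PySem.Set.add (d.getD s PySem.Set.empty) p.1)) d)
                      PySem.Dict.empty).getD s PySem.Set.empty)) PySem.Set.empty)
              (fun x => x))]) := by
      funext res w
      rw [per_waypoint_eq r_ids ((pyLookup w_req w).getD []) (fun r => (pyLookup r_sen r).getD [])]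
    rw [hf]
    simp
  · simp [h]

-- ===== VERDICT (by name: the statement is the Claim_ definition above) =====
theorem create_domains_spec : Claim_equal_create_domains := by
  intro w_ids r_ids w_req r_sen t _ _
  unfold Spec_create_domains
  exact create_domains_eq_alt w_ids r_ids w_req r_sen t
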